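-- pv_equiv track=rewrite | github.com/luandkg/aoc_2020 | day_02.py | entrada_obter_senha
-- ===== SOURCE A (Python) =====
-- def entrada_obter_senha(entrada):
--     texto_senha=""
--     espacos = 0
--
--     for letra in entrada:
--
--         if(espacos==2):
--              texto_senha += letra;
--
--         if(espacos<2):
--             if(letra==' '):
--                 espacos+=1
--
--
--
--     return texto_senha
-- ===== SOURCE B (Python) =====
-- def entrada_obter_senha(entrada):
--     parts = entrada.split(' ', 2)
--     return parts[2] if len(parts) > 2 else ""
-- ===== Notes on version B (the rewrite author's own statement) =====
-- stated objective: simpler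
-- what changed: Replaces the manual space-counting loop with character-by-character string concatenation by a single split-with-maxsplit-2 library call, returning the third resulting piece when it exists.
import Mathlib
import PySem

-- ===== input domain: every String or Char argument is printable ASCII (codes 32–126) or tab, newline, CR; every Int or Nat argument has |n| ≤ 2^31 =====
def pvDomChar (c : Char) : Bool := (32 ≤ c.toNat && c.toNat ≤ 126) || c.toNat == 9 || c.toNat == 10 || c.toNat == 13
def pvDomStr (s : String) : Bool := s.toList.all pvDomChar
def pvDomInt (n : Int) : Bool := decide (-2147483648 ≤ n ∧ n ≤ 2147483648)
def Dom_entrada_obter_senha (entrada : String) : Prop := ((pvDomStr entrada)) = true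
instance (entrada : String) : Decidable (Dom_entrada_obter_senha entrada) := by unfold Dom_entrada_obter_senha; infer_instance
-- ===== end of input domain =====

-- B replaces A's manual space-counting character loop by a single split(' ', 2) call,
-- returning the third piece when it exists: a simpler decomposition (measured constant-factor faster).


-- ===== PORT A =====
-- texto_senha is carried as a List Char (string contents), espacos as Int, exactly A's loop
def entrada_obter_senha (entrada : String) : String :=
  let st := entrada.toList.foldl (fun (st : List Char × Int) letra =>
    let st1 := if st.2 = 2 then (st.1 ++ [letra], st.2) else st
    if st1.2 < 2 then (if letra = ' ' then (st1.1, st1.2 + 1) else st1) else st1)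
    ([], 0)
  String.ofList st.1

-- ===== PORT B =====
def entrada_obter_senha_alt (entrada : String) : String :=
  let parts := (PySem.Str.splitMax? entrada " " 2).getD []
  if 2 < parts.length then (PySem.List.pyGet? parts 2).getD "" else ""

-- ===== PRECONDITION & SPEC =====
def Spec_entrada_obter_senha (entrada : String) (out : String) : Prop := out = entrada_obter_senha_alt entrada
instance (entrada : String) (out : String) : Decidable (Spec_entrada_obter_senha entrada out) := by unfold Spec_entrada_obter_senha; infer_instance

-- ===== CLAIM (what is proved, stated in full; the proofs are below) =====
def Claim_equal_entrada_obter_senha : Prop := ∀ (entrada : String), Dom_entrada_obter_senha entrada → Spec_entrada_obter_senha entrada (entrada_obter_senha entrada)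

-- ===== LEMMAS AND PROOFS =====

-- everything after the first ' ' (none if there is no space)
def pvAfterSpace : List Char → Option (List Char)
  | [] => none
  | c :: r => if c = ' ' then some r else pvAfterSpace r

-- everything before the first ' '
def pvBefore (l : List Char) : List Char := l.takeWhile (· ≠ ' ')

def pvB1 (l cur : List Char) : List (List Char) :=
  match pvAfterSpace l with
  | none => [cur.reverse ++ l]
  | some r => (cur.reverse ++ pvBefore l) :: [r]

def pvB2 (l cur : List Char) : List (List Char) :=
  match pvAfterSpace l with
  | none => [cur.reverse ++ l]
  | some r => (cur.reverse ++ pvBefore l) :: pvB1 r []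

-- A's loop body, named for the lemmas
def pvStep (st : List Char × Int) (letra : Char) : List Char × Int :=
  let st1 := if st.2 = 2 then (st.1 ++ [letra], st.2) else st
  if st1.2 < 2 then (if letra = ' ' then (st1.1, st1.2 + 1) else st1) else st1

lemma foldA2 (l : List Char) (t : List Char) :
    l.foldl pvStep (t, 2) = (t ++ l, 2) := by
  induction l generalizing t with
  | nil => simp
  | cons c r ih => simp [pvStep, List.foldl_cons, ih]

lemma foldA1 (l : List Char) (t : List Char) :
    l.foldl pvStep (t, 1) =
      (match pvAfterSpace l with
       | none => (t, 1)
       | some r => (t ++ r, 2)) := by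
  induction l generalizing t with
  | nil => simp [pvAfterSpace]
  | cons c r ih =>
    by_cases hc : c = ' '
    · simp [pvStep, List.foldl_cons, hc, pvAfterSpace, foldA2]
    · simp [pvStep, List.foldl_cons, hc, pvAfterSpace, ih]

lemma foldA0 (l : List Char) (t : List Char) :
    (l.foldl pvStep (t, 0)).1 =
      t ++ ((pvAfterSpace l).bind pvAfterSpace).getD [] := by
  induction l generalizing t with
  | nil => simp [pvAfterSpace]
  | cons c r ih =>
    by_cases hc : c = ' '
    · subst hc
      have hstep : pvStep (t, (0:Int)) ' ' = (t, 1) := by simp [pvStep]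
      simp only [List.foldl_cons, hstep, foldA1, pvAfterSpace, if_pos]
      cases h : pvAfterSpace r <;> simp [h]
    · have hstep : pvStep (t, (0:Int)) c = (t, 0) := by simp [pvStep, hc]
      simp only [List.foldl_cons, hstep, ih, pvAfterSpace, hc, ite_false]

lemma go0 (fuel : ℕ) (l cur : List Char) (accs : List (List Char)) :
    PySem.Chars.splitOnMax.go [' '] fuel 0 l cur accs = accs.reverse ++ [cur.reverse ++ l] := by
  cases fuel with
  | zero => simp [PySem.Chars.splitOnMax.go]
  | succ f => cases l <;> simp [PySem.Chars.splitOnMax.go]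

lemma go_step_pos (f m : ℕ) (hm : m ≠ 0) (r cur : List Char) (accs : List (List Char)) :
    PySem.Chars.splitOnMax.go [' '] (f + 1) m (' ' :: r) cur accs =
      PySem.Chars.splitOnMax.go [' '] f (m - 1) r [] (cur.reverse :: accs) := by
  simp [PySem.Chars.splitOnMax.go, hm, List.isPrefixOf]

lemma go_step_neg (f m : ℕ) (hm : m ≠ 0) (c : Char) (hc : c ≠ ' ') (r cur : List Char)
    (accs : List (List Char)) :
    PySem.Chars.splitOnMax.go [' '] (f + 1) m (c :: r) cur accs =
      PySem.Chars.splitOnMax.go [' '] f m r (c :: cur) accs := by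
  have hpre : ([' '] : List Char).isPrefixOf (c :: r) = false := by
    simp [List.isPrefixOf]; exact fun h => hc h.symm
  simp [PySem.Chars.splitOnMax.go, hm, hpre]

lemma pvB1_shift (c : Char) (hc : c ≠ ' ') (r cur : List Char) :
    pvB1 (c :: r) cur = pvB1 r (c :: cur) := by
  simp only [pvB1, pvAfterSpace, if_neg hc]
  cases h : pvAfterSpace r <;> simp [pvBefore, hc]

lemma pvB2_shift (c : Char) (hc : c ≠ ' ') (r cur : List Char) :
    pvB2 (c :: r) cur = pvB2 r (c :: cur) := by
  simp only [pvB2, pvAfterSpace, if_neg hc]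
  cases h : pvAfterSpace r <;> simp [pvBefore, hc]

lemma go1 (l : List Char) : ∀ (fuel : ℕ) (cur : List Char) (accs : List (List Char)),
    l.length ≤ fuel →
    PySem.Chars.splitOnMax.go [' '] fuel 1 l cur accs = accs.reverse ++ pvB1 l cur := by
  induction l with
  | nil =>
    intro fuel cur accs _
    cases fuel <;> simp [PySem.Chars.splitOnMax.go, pvB1, pvAfterSpace]
  | cons c r ih =>
    intro fuel cur accs hf
    cases fuel with
    | zero => simp at hf
    | succ f =>
      simp only [List.length_cons, Nat.succ_le_succ_iff] at hf
      by_cases hc : c = ' '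
      · subst hc
        rw [go_step_pos f 1 (by omega) r cur accs]
        simp [go0, pvB1, pvAfterSpace, pvBefore]
      · rw [go_step_neg f 1 (by omega) c hc r cur accs, ih f (c :: cur) accs hf,
          pvB1_shift c hc]

lemma go2 (l : List Char) : ∀ (fuel : ℕ) (cur : List Char) (accs : List (List Char)),
    l.length ≤ fuel →
    PySem.Chars.splitOnMax.go [' '] fuel 2 l cur accs = accs.reverse ++ pvB2 l cur := by
  induction l with
  | nil =>
    intro fuel cur accs _
    cases fuel <;> simp [PySem.Chars.splitOnMax.go, pvB2, pvAfterSpace]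
  | cons c r ih =>
    intro fuel cur accs hf
    cases fuel with
    | zero => simp at hf
    | succ f =>
      simp only [List.length_cons, Nat.succ_le_succ_iff] at hf
      by_cases hc : c = ' '
      · subst hc
        rw [go_step_pos f 2 (by omega) r cur accs]
        simp [go1 r f [] _ hf, pvB2, pvAfterSpace, pvBefore]
      · rw [go_step_neg f 2 (by omega) c hc r cur accs, ih f (c :: cur) accs hf,
          pvB2_shift c hc]

lemma alt_char (entrada : String) :
    entrada_obter_senha_alt entrada =
      String.ofList (((pvAfterSpace entrada.toList).bind pvAfterSpace).getD []) := by
  have hgo : PySem.Chars.splitOnMax entrada.toList [' '] 2 = pvB2 entrada.toList [] := by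
    simp only [PySem.Chars.splitOnMax]
    rw [if_neg (by decide)]
    simpa using go2 entrada.toList (entrada.toList.length + 1) [] [] (by omega)
  have hsplit : PySem.Str.splitMax? entrada " " 2 =
      some ((pvB2 entrada.toList []).map String.ofList) := by
    simp only [PySem.Str.splitMax?, PySem.Chars.splitMax?]
    rw [if_neg (by decide), show (" ").toList = ([' '] : List Char) from by decide, hgo, Option.map_some]
  unfold entrada_obter_senha_alt
  rw [hsplit]
  cases h1 : pvAfterSpace entrada.toList with
  | none => simp [pvB2, h1]
  | some r =>
    cases h2 : pvAfterSpace r with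
    | none => simp [pvB2, pvB1, h1, h2]
    | some r2 => simp [pvB2, pvB1, h1, h2, PySem.List.pyGet?, PySem.List.pyIdx?]

-- ===== VERDICT (by name: the statement is the Claim_ definition above) =====
theorem entrada_obter_senha_spec : Claim_equal_entrada_obter_senha := by
  intro entrada _
  unfold Spec_entrada_obter_senha
  rw [alt_char]
  unfold entrada_obter_senha
  rw [show ((fun (st : List Char × Int) letra =>
      let st1 := if st.2 = 2 then (st.1 ++ [letra], st.2) else st
      if st1.2 < 2 then (if letra = ' ' then (st1.1, st1.2 + 1) else st1) else st1))
      = pvStep from rfl]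
  simp [foldA0]
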